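-- pv_equiv track=rewrite | github.com/spenly/texim | text_cosine/base.py | words_match
-- ===== SOURCE A (Python) =====
-- def item_match(x, y, semi_match):
--     if semi_match:
--         ml = min(len(x), len(y))
--         return x[:ml] == y[:ml]
--     else:
--         return x == y
--
-- def words_match(xs, ys, semi_match=False):
--     xls = sorted(xs, key=lambda x: len(x), reverse=True)
--     pairs = []
--     for x in xls:
--         nys = []
--         if not x: continue
--         for i in range(len(ys)):
--             y = ys[i]
--             if not y: continue
--             if item_match(x, y, semi_match):
--                 pairs.append( (x, y) )
--             else:
--                 nys.append(y)
--         ys = nys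
--     return pairs
-- ===== SOURCE B (Python) =====
-- def item_match(x, y, semi_match):
--     if semi_match:
--         ml = min(len(x), len(y))
--         return x[:ml] == y[:ml]
--     else:
--         return x == y
--
-- def words_match(xs, ys, semi_match=False):
--     # Each y is claimed by the first (longest-first) x that matches it; bucket the
--     # ys by that owner index and emit the buckets per x, instead of rescanning and
--     # rebuilding the ys list for every x.  Exact match finds the owner by one dict
--     # lookup instead of a scan.
--     xls = sorted(xs, key=lambda x: len(x), reverse=True)
--     if semi_match:
--         def owner(y):
--             for i, x in enumerate(xls):
--                 if x and item_match(x, y, True):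
--                     return i
--             return None
--     else:
--         idx = {}
--         for i, x in enumerate(xls):
--             if x and x not in idx:
--                 idx[x] = i
--         def owner(y):
--             return idx.get(y)
--     buckets = {}
--     for y in ys:
--         if not y:
--             continue
--         i = owner(y)
--         if i is not None:
--             buckets.setdefault(i, []).append(y)
--     pairs = []
--     for i, x in enumerate(xls):
--         for y in buckets.get(i, ()):
--             pairs.append((x, y))
--     return pairs
-- ===== Notes on version B (the rewrite author's own statement) =====
-- stated objective: alternative
-- what changed: Instead of rescanning and rebuilding the remaining-ys list for every x, B computes each y's owner (the first longest-first x that matches it) in one pass over ys -- by a dict lookup for exact match, by a scan over xls for semi_match -- buckets the ys per owner index, and emits the buckets per x.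
import Mathlib
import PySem

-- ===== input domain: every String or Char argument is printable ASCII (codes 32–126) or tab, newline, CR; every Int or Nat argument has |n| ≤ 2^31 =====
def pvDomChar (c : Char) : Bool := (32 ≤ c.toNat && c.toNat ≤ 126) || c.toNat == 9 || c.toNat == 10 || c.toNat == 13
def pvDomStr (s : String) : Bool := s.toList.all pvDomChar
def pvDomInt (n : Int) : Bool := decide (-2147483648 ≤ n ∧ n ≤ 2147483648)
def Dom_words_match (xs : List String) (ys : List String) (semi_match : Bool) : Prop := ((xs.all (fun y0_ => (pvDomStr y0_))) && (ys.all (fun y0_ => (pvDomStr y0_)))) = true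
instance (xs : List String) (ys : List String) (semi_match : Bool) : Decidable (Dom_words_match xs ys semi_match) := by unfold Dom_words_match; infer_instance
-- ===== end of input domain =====

-- B buckets each y under the first (longest-first) x that matches it and emits the buckets
-- per x (dict lookup for exact match), instead of A's rescan-and-rebuild of ys for every x.

-- ===== PORT A =====
-- helper item_match, shared by both ports (Source B carries the same helper verbatim)
def itemMatch (x : String) (y : String) (sm : Bool) : Bool :=
  if sm then
    let ml := min (PySem.Str.len x) (PySem.Str.len y)
    PySem.Str.slice x none (some ml) == PySem.Str.slice y none (some ml)
  else x == y

-- 'for i in range(len(ys)): y = ys[i]' reads the elements of ys in order: folded over ys directly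
def words_match (xs : List String) (ys : List String) (semi_match : Bool) : List (String × String) :=
  let xls := PySem.List.sorted xs (fun x => PySem.Str.len x) true
  let st := xls.foldl (fun (st : List (String × String) × List String) x =>
    if x == "" then st
    else
      let r := st.2.foldl (fun (r : List (String × String) × List String) y =>
        if y == "" then r
        else if itemMatch x y semi_match then (r.1 ++ [(x, y)], r.2)
        else (r.1, r.2 ++ [y])) (st.1, ([] : List String))
      (r.1, r.2)) (([] : List (String × String)), ys)
  st.1

-- ===== PORT B =====
-- 'for i, x in enumerate(xls): if x and item_match(x, y, True): return i / return None'
def ownerSemiAux (ms : List (Int × String)) (y : String) : Option Int :=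
  match ms with
  | [] => none
  | (i, x) :: t => if !(x == "") && itemMatch x y true then some i else ownerSemiAux t y

-- 'idx = {}; for i, x in enumerate(xls): if x and x not in idx: idx[x] = i'
def mkIdx (ms : List (Int × String)) : PySem.Dict String Int :=
  ms.foldl (fun d (p : Int × String) =>
    if !(p.2 == "") && !(d.contains p.2) then d.insert p.2 p.1 else d) PySem.Dict.empty

def words_match_alt (xs : List String) (ys : List String) (semi_match : Bool) : List (String × String) :=
  let xls := PySem.List.sorted xs (fun x => PySem.Str.len x) true
  let en := PySem.List.enumerate xls 0
  let owner : String → Option Int :=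
    if semi_match then fun y => ownerSemiAux en y
    else
      let idx := mkIdx en
      fun y => idx.get? y
  let buckets : PySem.Dict Int (List String) :=
    ys.foldl (fun d y =>
      if y == "" then d
      else
        match owner y with
        | some i => d.modify i [] (· ++ [y])   -- buckets.setdefault(i, []).append(y)
        | none => d) PySem.Dict.empty
  en.foldl (fun ps (p : Int × String) =>
    ps ++ (buckets.getD p.1 []).map (fun y => (p.2, y))) []

-- ===== PRECONDITION & SPEC =====
def Spec_words_match (xs : List String) (ys : List String) (semi_match : Bool) (out : List (String × String)) : Prop := out = words_match_alt xs ys semi_match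
instance (xs : List String) (ys : List String) (semi_match : Bool) (out : List (String × String)) : Decidable (Spec_words_match xs ys semi_match out) := by unfold Spec_words_match; infer_instance

-- ===== CLAIM (what is proved, stated in full; the proofs are below) =====
def Claim_equal_words_match : Prop := ∀ (xs : List String) (ys : List String) (semi_match : Bool), Dom_words_match xs ys semi_match → Spec_words_match xs ys semi_match (words_match xs ys semi_match)

-- ===== LEMMAS AND PROOFS =====

-- matching condition of a nonempty x ('x and item_match(x, y, sm)')
def mcond (sm : Bool) (x : String) (y : String) : Bool := !(x == "") && itemMatch x y sm

-- index (counting from s) of the first nonempty element of l matching y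
def specOwner (sm : Bool) : List String → Int → String → Option Int
  | [], _, _ => none
  | x :: t, s, y => if mcond sm x y then some s else specOwner sm t (s + 1) y

-- named forms of the step functions of the two ports (definitionally equal to the lambdas there)
def innerF (sm : Bool) (x : String) (r : List (String × String) × List String) (y : String) :
    List (String × String) × List String :=
  if y == "" then r
  else if itemMatch x y sm then (r.1 ++ [(x, y)], r.2)
  else (r.1, r.2 ++ [y])

def outerF (sm : Bool) (st : List (String × String) × List String) (x : String) :
    List (String × String) × List String :=
  if x == "" then st
  else
    let r := st.2.foldl (innerF sm x) (st.1, ([] : List String))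
    (r.1, r.2)

def bucketF (ow : String → Option Int) (d : PySem.Dict Int (List String)) (y : String) :
    PySem.Dict Int (List String) :=
  if y == "" then d
  else
    match ow y with
    | some i => d.modify i [] (· ++ [y])
    | none => d

-- recursive form of A's outer loop
def loopA (sm : Bool) : List String → List String → List (String × String)
  | [], _ => []
  | x :: t, ys =>
    if x == "" then loopA sm t ys
    else ((ys.filter (fun y => !(y == "") && itemMatch x y sm)).map (fun y => (x, y)))
      ++ loopA sm t (ys.filter (fun y => !(y == "") && !(itemMatch x y sm)))

-- the common normal form both ports are reduced to
def wmForm (sm : Bool) (l : List String) (s : Int) (ys : List String) : List (String × String) :=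
  (PySem.List.enumerate l s).flatMap (fun p =>
    (ys.filter (fun y => !(y == "") && (specOwner sm l s y == some p.1))).map (fun y => (p.2, y)))

theorem flatMap_congr_mem {α β : Type} (l : List α) (f g : α → List β)
    (h : ∀ a ∈ l, f a = g a) : l.flatMap f = l.flatMap g := by
  induction l with
  | nil => rfl
  | cons a t ih =>
    simp only [List.flatMap_cons, h a (by simp), ih (fun a ha => h a (by simp [ha]))]

theorem specOwner_ge (sm : Bool) (l : List String) (s : Int) (y : String) (i : Int)
    (h : specOwner sm l s y = some i) : s ≤ i := by
  induction l generalizing s with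
  | nil => simp [specOwner] at h
  | cons x t ih =>
    simp only [specOwner] at h
    by_cases hm : mcond sm x y
    · simp [hm] at h; omega
    · simp [hm] at h; have := ih (s + 1) h; omega

theorem innerA (sm : Bool) (x : String) (ys : List String)
    (ps : List (String × String)) (ns : List String) :
    ys.foldl (innerF sm x) (ps, ns)
    = (ps ++ (ys.filter (fun y => !(y == "") && itemMatch x y sm)).map (fun y => (x, y)),
       ns ++ ys.filter (fun y => !(y == "") && !(itemMatch x y sm))) := by
  induction ys generalizing ps ns with
  | nil => simp
  | cons y t ih =>
    rw [List.foldl_cons]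
    by_cases hy : y = ""
    · rw [show innerF sm x (ps, ns) y = (ps, ns) by simp [innerF, hy], ih]; simp [hy]
    · by_cases hm : itemMatch x y sm
      · rw [show innerF sm x (ps, ns) y = (ps ++ [(x, y)], ns) by simp [innerF, hy, hm], ih]
        simp [hy, hm]
      · rw [show innerF sm x (ps, ns) y = (ps, ns ++ [y]) by simp [innerF, hy, hm], ih]
        simp [hy, hm]

theorem outerA (sm : Bool) (xls : List String) (ys : List String) (ps : List (String × String)) :
    (xls.foldl (outerF sm) (ps, ys)).1 = ps ++ loopA sm xls ys := by
  induction xls generalizing ys ps with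
  | nil => simp [loopA]
  | cons x t ih =>
    rw [List.foldl_cons]
    by_cases hx : x = ""
    · rw [show outerF sm (ps, ys) x = (ps, ys) by simp [outerF, hx], ih]; simp [loopA, hx]
    · rw [show outerF sm (ps, ys) x
          = (ps ++ (ys.filter (fun y => !(y == "") && itemMatch x y sm)).map (fun y => (x, y)),
             ys.filter (fun y => !(y == "") && !(itemMatch x y sm))) by
            simp only [outerF, if_neg (by simp [hx] : ¬((x == "") = true))]
            rw [innerA]; simp, ih]
      simp [loopA, hx]

theorem main_form (sm : Bool) (l : List String) (s : Int) (ys : List String) :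
    loopA sm l ys = wmForm sm l s ys := by
  induction l generalizing s ys with
  | nil => simp [loopA, wmForm, PySem.List.enumerate_nil]
  | cons x t ih =>
    unfold wmForm
    rw [PySem.List.enumerate_cons, List.flatMap_cons]
    by_cases hx : x = ""
    · have hso : ∀ y, specOwner sm (x :: t) s y = specOwner sm t (s + 1) y := by
        intro y; simp [specOwner, mcond, hx]
      have h1 : ys.filter (fun y => !(y == "") && (specOwner sm (x :: t) s y == some s)) = [] := by
        apply List.filter_eq_nil_iff.mpr
        intro y _
        rw [hso y]
        cases h : specOwner sm t (s + 1) y with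
        | none => simp
        | some i => have := specOwner_ge sm t (s + 1) y i h; simp; omega
      rw [h1]
      simp only [hso, List.map_nil, List.nil_append]
      rw [show loopA sm (x :: t) ys = loopA sm t ys by simp [loopA, hx]]
      rw [ih (s + 1) ys]; rfl
    · have h1 : ys.filter (fun y => !(y == "") && (specOwner sm (x :: t) s y == some s))
          = ys.filter (fun y => !(y == "") && itemMatch x y sm) := by
        apply List.filter_congr
        intro y _
        by_cases hy : y = ""
        · simp [hy]
        · by_cases hi : itemMatch x y sm
          · simp [specOwner, mcond, hx, hy, hi]
          · simp only [specOwner, mcond]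
            rw [if_neg (by simp [hi])]
            cases h : specOwner sm t (s + 1) y with
            | none => simp [hy, hi]
            | some i => have := specOwner_ge sm t (s + 1) y i h; simp [hy, hi]; omega
      have h2 : ∀ p ∈ PySem.List.enumerate t (s + 1),
          (ys.filter (fun y => !(y == "") && (specOwner sm (x :: t) s y == some p.1))).map
              (fun y => (p.2, y))
          = ((ys.filter (fun y => !(y == "") && !(itemMatch x y sm))).filter
              (fun y => !(y == "") && (specOwner sm t (s + 1) y == some p.1))).map
              (fun y => (p.2, y)) := by
        intro p hp
        obtain ⟨k, hk, hpk⟩ := (PySem.List.mem_enumerate_iff _ _ _).mp hp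
        have hps : s < p.1 := by rw [hpk]; simp; omega
        congr 1
        rw [List.filter_filter]
        apply List.filter_congr
        intro y _
        by_cases hy : y = ""
        · simp [hy]
        · by_cases hi : itemMatch x y sm
          · simp only [specOwner, mcond]
            rw [if_pos (by simp [hx, hi])]
            simp [hy, hi]
            omega
          · simp only [specOwner, mcond]
            rw [if_neg (by simp [hi])]
            simp [hy, hi]
      rw [flatMap_congr_mem _ _ _ h2]
      rw [h1]
      rw [show loopA sm (x :: t) ys
          = ((ys.filter (fun y => !(y == "") && itemMatch x y sm)).map (fun y => (x, y)))
            ++ loopA sm t (ys.filter (fun y => !(y == "") && !(itemMatch x y sm))) by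
          simp [loopA, hx]]
      rw [ih (s + 1) (ys.filter (fun y => !(y == "") && !(itemMatch x y sm)))]
      rfl

theorem ownerSemi_spec (l : List String) (s : Int) (y : String) :
    ownerSemiAux (PySem.List.enumerate l s) y = specOwner true l s y := by
  induction l generalizing s with
  | nil => simp [PySem.List.enumerate_nil, ownerSemiAux, specOwner]
  | cons x t ih =>
    simp [PySem.List.enumerate_cons, ownerSemiAux, specOwner, mcond, ih]

def idxF (d : PySem.Dict String Int) (p : Int × String) : PySem.Dict String Int :=
  if !(p.2 == "") && !(d.contains p.2) then d.insert p.2 p.1 else d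

theorem idx_spec (l : List String) (s : Int) (d : PySem.Dict String Int) (y : String) :
    ((PySem.List.enumerate l s).foldl idxF d).get? y
    = (d.get? y).or (specOwner false l s y) := by
  induction l generalizing s d with
  | nil => simp [PySem.List.enumerate_nil, specOwner]
  | cons x t ih =>
    rw [PySem.List.enumerate_cons, List.foldl_cons]
    by_cases hx : x = ""
    · rw [show idxF d (s, x) = d by simp [idxF, hx], ih]
      simp [specOwner, mcond, hx]
    · by_cases hc : d.contains x
      · rw [show idxF d (s, x) = d by simp [idxF, hc], ih]
        by_cases hxy : x = y
        · obtain ⟨v, hv⟩ : ∃ v, d.get? y = some v := by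
            rcases h : d.get? y with _ | v
            · rw [PySem.Dict.get?_eq_none_iff_contains] at h
              rw [← hxy] at h; rw [h] at hc; exact absurd hc (by simp)
            · exact ⟨v, rfl⟩
          simp [hv]
        · rw [show specOwner false (x :: t) s y = specOwner false t (s + 1) y by
            simp only [specOwner]
            rw [if_neg (by simp [mcond, itemMatch, hxy])]]
      · rw [show idxF d (s, x) = d.insert x s by simp [idxF, hx, hc], ih]
        rw [PySem.Dict.get?_insert]
        by_cases hxy : y = x
        · rw [if_pos hxy]
          have hd : d.get? y = none := by
            rw [PySem.Dict.get?_eq_none_iff_contains, hxy]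
            simpa using hc
          rw [hd]
          have h2 : specOwner false (x :: t) s y = some s := by
            simp [specOwner, mcond, itemMatch, hx, hxy]
          rw [h2]
          simp
        · rw [if_neg hxy]
          rw [show specOwner false (x :: t) s y = specOwner false t (s + 1) y by
            simp only [specOwner]
            rw [if_neg (by simp [mcond, itemMatch]; intro _ h; exact hxy h.symm)]]

theorem bucket_spec (ow : String → Option Int) (ys : List String)
    (d : PySem.Dict Int (List String)) (i : Int) :
    (ys.foldl (bucketF ow) d).getD i []
    = d.getD i [] ++ ys.filter (fun y => !(y == "") && (ow y == some i)) := by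
  induction ys generalizing d with
  | nil => simp
  | cons y t ih =>
    rw [List.foldl_cons]
    by_cases hy : y = ""
    · rw [show bucketF ow d y = d by simp [bucketF, hy], ih]
      simp [hy]
    · rcases how : ow y with _ | j
      · rw [show bucketF ow d y = d by simp [bucketF, hy, how], ih]
        simp [hy, how]
      · rw [show bucketF ow d y = d.modify j [] (· ++ [y]) by simp [bucketF, hy, how], ih]
        rw [PySem.Dict.getD_modify]
        by_cases hij : i = j
        · subst hij
          rw [if_pos rfl]
          simp [hy, how]
        · rw [if_neg hij]
          have : (ow y == some i) = false := by simp [how]; exact fun h => absurd h.symm hij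
          simp [hy, this]

theorem emit_spec (en : List (Int × String)) (ow : String → Option Int) (ys : List String) :
    en.foldl (fun ps (p : Int × String) =>
      ps ++ ((ys.foldl (bucketF ow) PySem.Dict.empty).getD p.1 []).map (fun y => (p.2, y))) []
    = en.flatMap (fun p =>
        (ys.filter (fun y => !(y == "") && (ow y == some p.1))).map (fun y => (p.2, y))) := by
  rw [PySem.List.foldl_append_eq_flatMap]
  rw [List.nil_append]
  apply flatMap_congr_mem
  intro p _
  rw [bucket_spec]
  simp

theorem alt_form (xs : List String) (ys : List String) (sm : Bool) :
    words_match_alt xs ys sm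
    = wmForm sm (PySem.List.sorted xs (fun x => PySem.Str.len x) true) 0 ys := by
  cases sm with
  | false =>
    calc words_match_alt xs ys false
        = (PySem.List.enumerate (PySem.List.sorted xs (fun x => PySem.Str.len x) true) 0).foldl
            (fun ps (p : Int × String) =>
              ps ++ ((ys.foldl (bucketF (fun y =>
                (mkIdx (PySem.List.enumerate (PySem.List.sorted xs (fun x => PySem.Str.len x) true) 0)).get? y))
                PySem.Dict.empty).getD p.1 []).map (fun y => (p.2, y))) [] := rfl
      _ = _ := by
        rw [emit_spec]
        unfold wmForm
        apply flatMap_congr_mem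
        intro p _
        congr 1
        apply List.filter_congr
        intro y _
        rw [show (mkIdx (PySem.List.enumerate (PySem.List.sorted xs (fun x => PySem.Str.len x) true) 0)).get? y
            = ((PySem.List.enumerate (PySem.List.sorted xs (fun x => PySem.Str.len x) true) 0).foldl idxF PySem.Dict.empty).get? y from rfl]
        rw [idx_spec]
        simp
  | true =>
    calc words_match_alt xs ys true
        = (PySem.List.enumerate (PySem.List.sorted xs (fun x => PySem.Str.len x) true) 0).foldl
            (fun ps (p : Int × String) =>
              ps ++ ((ys.foldl (bucketF (fun y =>
                ownerSemiAux (PySem.List.enumerate (PySem.List.sorted xs (fun x => PySem.Str.len x) true) 0) y))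
                PySem.Dict.empty).getD p.1 []).map (fun y => (p.2, y))) [] := rfl
      _ = _ := by
        rw [emit_spec]
        unfold wmForm
        apply flatMap_congr_mem
        intro p _
        congr 1
        apply List.filter_congr
        intro y _
        rw [ownerSemi_spec]

-- ===== VERDICT (by name: the statement is the Claim_ definition above) =====
theorem words_match_spec : Claim_equal_words_match := by
  intro xs ys sm _
  unfold Spec_words_match
  rw [alt_form]
  show (words_match xs ys sm) = _
  unfold words_match
  rw [show (fun (st : List (String × String) × List String) x =>
        if x == "" then st
        else
          let r := st.2.foldl (fun (r : List (String × String) × List String) y =>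
            if y == "" then r
            else if itemMatch x y sm then (r.1 ++ [(x, y)], r.2)
            else (r.1, r.2 ++ [y])) (st.1, ([] : List String))
          (r.1, r.2)) = outerF sm from rfl]
  rw [outerA]
  rw [main_form sm _ 0 ys]
  simp
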